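-- pv_equiv track=rewrite | github.com/DamianHuerta/Gatech-CS-CourseWork | CS-1301-Python/HW09.py | count_patterns_r
-- ===== SOURCE A (Python) =====
-- def count_patterns_r(mystr):
--     if len(mystr) < 3:
--         return 0
--     else:
--         count = count_patterns_r(mystr[1:])
--         pat = mystr[0:3]
--         if pat[0] == pat[2] and pat[0] != pat[1]:
--             count += 1
--         return count
-- ===== SOURCE B (Python) =====
-- def count_patterns_r(mystr):
--     return sum(1 for a, b, c in zip(mystr, mystr[1:], mystr[2:])
--                if a == c and a != b)
-- ===== Notes on version B (the rewrite author's own statement) =====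
-- stated objective: faster
-- what changed: Replaced the recursion that re-slices the whole string at every step with a single linear pass over zipped character triples.
import Mathlib
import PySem

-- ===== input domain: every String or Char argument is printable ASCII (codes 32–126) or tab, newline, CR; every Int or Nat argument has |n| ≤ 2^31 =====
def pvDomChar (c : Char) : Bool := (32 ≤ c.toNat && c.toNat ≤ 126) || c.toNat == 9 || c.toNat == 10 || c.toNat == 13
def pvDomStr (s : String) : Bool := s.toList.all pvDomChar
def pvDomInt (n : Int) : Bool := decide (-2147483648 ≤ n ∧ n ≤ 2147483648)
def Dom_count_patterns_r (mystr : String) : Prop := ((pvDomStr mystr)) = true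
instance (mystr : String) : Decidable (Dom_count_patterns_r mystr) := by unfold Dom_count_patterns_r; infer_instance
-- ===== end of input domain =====

-- B replaces A's recursion (which re-slices the string each step) with one linear pass over
-- zipped character triples; timing objective: faster (asymptotic in Python's string model).


-- ===== PORT A =====
-- A on the character list: if len < 3 return 0; else recurse on mystr[1:], then look at
-- pat = mystr[0:3] and add 1 when pat[0] == pat[2] and pat[0] != pat[1].
def pvARec : List Char → Int
  | c0 :: c1 :: c2 :: rest =>
      let count := pvARec (c1 :: c2 :: rest)
      if c0 = c2 ∧ c0 ≠ c1 then count + 1 else count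
  | _ => 0

def count_patterns_r (mystr : String) : Int := pvARec mystr.toList

-- ===== PORT B =====
-- B: sum over zip(mystr, mystr[1:], mystr[2:]) of the triples with a == c and a != b.
def count_patterns_r_alt (mystr : String) : Int :=
  ((mystr.toList.zip ((mystr.toList.tail).zip (mystr.toList.tail.tail))).countP
    (fun t => t.1 = t.2.2 ∧ t.1 ≠ t.2.1) : Nat)

-- ===== PRECONDITION & SPEC =====
def Spec_count_patterns_r (mystr : String) (out : Int) : Prop := out = count_patterns_r_alt mystr
instance (mystr : String) (out : Int) : Decidable (Spec_count_patterns_r mystr out) := by unfold Spec_count_patterns_r; infer_instance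

-- ===== CLAIM (what is proved, stated in full; the proofs are below) =====
def Claim_equal_count_patterns_r : Prop := ∀ (mystr : String), Dom_count_patterns_r mystr → Spec_count_patterns_r mystr (count_patterns_r mystr)

-- ===== LEMMAS AND PROOFS =====
def pvBList (cs : List Char) : Int :=
  ((cs.zip ((cs.tail).zip cs.tail.tail)).countP (fun t => t.1 = t.2.2 ∧ t.1 ≠ t.2.1) : Nat)

theorem pvARec_eq_pvBList : ∀ cs : List Char, pvARec cs = pvBList cs
  | [] => by simp [pvARec, pvBList]
  | [_] => by simp [pvARec, pvBList]
  | [_, _] => by simp [pvARec, pvBList]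
  | c0 :: c1 :: c2 :: t => by
      have ih := pvARec_eq_pvBList (c1 :: c2 :: t)
      by_cases h : c0 = c2 ∧ c0 ≠ c1
      · obtain ⟨h1, h2⟩ := h
        subst h1
        simp only [pvARec, ih, pvBList, List.tail_cons, List.zip_cons_cons, List.countP_cons,
          decide_eq_true_eq]
        rw [if_pos ⟨trivial, h2⟩, if_pos ⟨trivial, h2⟩]
        push_cast
        omega
      · simp only [pvARec, ih, pvBList, List.tail_cons, List.zip_cons_cons, List.countP_cons,
          if_neg h, decide_eq_true_eq]
        simp

-- ===== VERDICT (by name: the statement is the Claim_ definition above) =====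
theorem count_patterns_r_spec : Claim_equal_count_patterns_r := by
  intro s _
  unfold Spec_count_patterns_r count_patterns_r count_patterns_r_alt
  exact pvARec_eq_pvBList s.toList
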